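-- pv_equiv track=rewrite | github.com/BrachystochroneSD/machine_learning | session1/sale_person/sale_person.py | get_largeY
-- ===== SOURCE A (Python) =====
-- def get_largeY(array,index):
--     ret_index=-1
--     ret=0
--     for i in range(len(array)):
--         if array[index]<array[i]:
--             ret=i
--             if ret > ret_index:
--                 ret_index=ret
--     return ret_index
-- ===== SOURCE B (Python) =====
-- def get_largeY(array, index):
--     for i, v in reversed(list(enumerate(array))):
--         if array[index] < v:
--             return i
--     return -1
-- ===== Notes on version B (the rewrite author's own statement) =====
-- stated objective: simpler
-- what changed: B scans the array right-to-left and returns on the first index whose value exceeds array[index] (early exit), instead of A's left-to-right scan maintaining a running best index; B also drops A's redundant ret/ret_index pair.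
import Mathlib
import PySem

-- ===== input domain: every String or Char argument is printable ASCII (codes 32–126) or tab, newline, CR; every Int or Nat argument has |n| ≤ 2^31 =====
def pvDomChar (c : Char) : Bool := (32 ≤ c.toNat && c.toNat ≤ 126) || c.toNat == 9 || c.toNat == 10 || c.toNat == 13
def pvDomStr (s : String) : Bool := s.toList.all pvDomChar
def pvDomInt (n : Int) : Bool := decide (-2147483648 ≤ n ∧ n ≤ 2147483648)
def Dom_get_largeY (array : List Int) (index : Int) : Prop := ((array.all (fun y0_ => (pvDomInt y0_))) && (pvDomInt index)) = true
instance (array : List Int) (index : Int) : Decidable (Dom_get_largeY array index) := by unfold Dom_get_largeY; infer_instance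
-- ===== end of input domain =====

-- B scans right-to-left with an early exit instead of A's left-to-right scan with a running best index (objective: simpler).


-- ===== PORT A =====
-- for i in range(len(array)): if array[index] < array[i]: ret = i; if ret > ret_index: ret_index = ret
-- state = (ret_index, ret); array[…] is pyGetD, exact under Pre_ (in-range access)
def get_largeY (array : List Int) (index : Int) : Int :=
  (PySem.List.pyRange 0 (array.length : Int) 1).foldl
    (fun (st : Int × Int) i =>
      if PySem.List.pyGetD array index 0 < PySem.List.pyGetD array i 0 then
        (if i > st.1 then i else st.1, i)
      else st)
    (-1, 0) |>.1

-- ===== PORT B =====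
-- for i, v in reversed(list(enumerate(array))): if array[index] < v: return i / return -1
def altGo (p : Int) : List (Int × Int) → Int
  | [] => -1
  | (i, v) :: rest => if p < v then i else altGo p rest

def get_largeY_alt (array : List Int) (index : Int) : Int :=
  altGo (PySem.List.pyGetD array index 0) (PySem.List.enumerate array 0).reverse

-- ===== PRECONDITION & SPEC =====
-- Pre_ excludes only inputs where Python A raises IndexError: a non-empty array with index out of range.
def Pre_get_largeY (array : List Int) (index : Int) : Prop :=
  array = [] ∨ PySem.Raise.InRange array.length index
instance (array : List Int) (index : Int) : Decidable (Pre_get_largeY array index) := by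
  unfold Pre_get_largeY; infer_instance

def pvWitness_get_largeY : List Int × Int := ([3, 1, 4, 1], 1)

def Spec_get_largeY (array : List Int) (index : Int) (out : Int) : Prop := out = get_largeY_alt array index
instance (array : List Int) (index : Int) (out : Int) : Decidable (Spec_get_largeY array index out) := by unfold Spec_get_largeY; infer_instance

-- ===== CLAIM (what is proved, stated in full; the proofs are below) =====
def Claim_equal_get_largeY : Prop := ∀ (array : List Int) (index : Int), Dom_get_largeY array index → Pre_get_largeY array index → Spec_get_largeY array index (get_largeY array index)

-- ===== LEMMAS AND PROOFS =====

theorem enumerate_take_concat (a : List Int) (n : Nat) (h : n < a.length) :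
    PySem.List.enumerate (a.take (n + 1)) 0
      = PySem.List.enumerate (a.take n) 0 ++ [((n : Int), a[n])] := by
  rw [← List.take_concat_get' a n h, PySem.List.enumerate_append]
  simp [PySem.List.enumerate_cons, PySem.List.enumerate_nil, Nat.min_eq_left h.le]

theorem fold_eq_altGo (a : List Int) (p : Int) (n : Nat) (hn : n ≤ a.length) :
    ((PySem.List.pyRange 0 (n : Int) 1).foldl
        (fun (st : Int × Int) i =>
          if p < PySem.List.pyGetD a i 0 then (if i > st.1 then i else st.1, i) else st)
        (-1, 0)).1
      = altGo p (PySem.List.enumerate (a.take n) 0).reverse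
    ∧ ((PySem.List.pyRange 0 (n : Int) 1).foldl
        (fun (st : Int × Int) i =>
          if p < PySem.List.pyGetD a i 0 then (if i > st.1 then i else st.1, i) else st)
        (-1, 0)).1 < (n : Int) := by
  induction n with
  | zero =>
      rw [PySem.List.pyRange_one_eq_nil (by norm_num)]
      simp [altGo]
  | succ n ih =>
      have hlt : n < a.length := hn
      obtain ⟨ih1, ih2⟩ := ih hlt.le
      have hr : PySem.List.pyRange 0 ((n + 1 : Nat) : Int) 1
          = PySem.List.pyRange 0 (n : Int) 1 ++ [(n : Int)] := by
        push_cast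
        exact PySem.List.pyRange_one_succ_right (by positivity)
      rw [hr, List.foldl_append, enumerate_take_concat a n hlt]
      have hget : PySem.List.pyGetD a ((n : Nat) : Int) 0 = a[n] := by
        simp [PySem.List.pyGetD_natCast, List.getD_eq_getElem?_getD, List.getElem?_eq_getElem hlt]
      simp only [List.foldl_cons, List.foldl_nil, List.reverse_append, List.reverse_cons,
        List.reverse_nil, List.nil_append, List.cons_append, altGo, hget]
      by_cases hp : p < a[n]
      · simp only [if_pos hp]
        constructor
        · simp [if_pos (by exact ih2 : ((n:Int)) > _)]
        · push_cast; omega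
      · simp only [if_neg hp]
        exact ⟨ih1, by push_cast; omega⟩

-- ===== VERDICT (by name: the statement is the Claim_ definition above) =====
theorem get_largeY_spec : Claim_equal_get_largeY := by
  intro array index _ _
  unfold Spec_get_largeY get_largeY get_largeY_alt
  have h := (fold_eq_altGo array (PySem.List.pyGetD array index 0) array.length le_rfl).1
  rw [List.take_length] at h
  exact h
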